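-- pv_equiv track=rewrite | github.com/yaffitc1/sidekick-discover | discovery/render/dashboard.py | _generate_sidebar
-- ===== SOURCE A (Python) =====
-- from typing import Dict, Any, List, Optional, Tuple
--
-- def _generate_sidebar(profiles: Dict[str, Any], source_name: str) -> str:
--     """Generate HTML for the sidebar navigation."""
--
--     # Simple list for now
--     html = "<h3>Navigation</h3>"
--     html += f'<ul><li><a href="#" class="sidebar-link" data-target="dashboard">Dashboard</a></li>'
--
--     # Reconstruct hierarchy from profiles
--     structure = {}
--     for key in profiles.keys():
--         parts = key.split('.')
--         if len(parts) == 2: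
--             table, column = parts
--             if table not in structure:
--                 structure[table] = []
--             structure[table].append(column)
--
--     # Build HTML
--     for table, columns in sorted(structure.items()):
--         html += f'<li><a href="#" class="sidebar-link" data-target="summary-{table}">{table}</a><ul>'
--         for col in sorted(columns):
--             html += f'<li><a href="#" class="sidebar-link" data-target="summary-{table}-{col}">{col}</a></li>'
--         html += '</ul></li>'
--
--     html += '</ul>'
--     return html
-- ===== SOURCE B (Python) =====
-- from itertools import groupby
--
-- def _generate_sidebar(profiles, source_name):
--     """Generate HTML for the sidebar navigation."""
--     pairs = sorted(
--         (parts[0], parts[1])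
--         for parts in (key.split('.') for key in profiles)
--         if len(parts) == 2
--     )
--     out = ['<h3>Navigation</h3>'
--            '<ul><li><a href="#" class="sidebar-link" data-target="dashboard">Dashboard</a></li>']
--     for table, group in groupby(pairs, key=lambda p: p[0]):
--         out.append(f'<li><a href="#" class="sidebar-link" data-target="summary-{table}">{table}</a><ul>')
--         out.extend(f'<li><a href="#" class="sidebar-link" data-target="summary-{table}-{col}">{col}</a></li>'
--                    for _, col in group)
--         out.append('</ul></li>')
--     out.append('</ul>')
--     return ''.join(out)
-- ===== Notes on version B (the rewrite author's own statement) =====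
-- stated objective: alternative
-- what changed: Replaces A's dict-of-lists grouping with per-table sorts by one flat sort of all (table, column) pairs walked with itertools.groupby, emitting the HTML pieces into a list joined once.
import Mathlib
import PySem

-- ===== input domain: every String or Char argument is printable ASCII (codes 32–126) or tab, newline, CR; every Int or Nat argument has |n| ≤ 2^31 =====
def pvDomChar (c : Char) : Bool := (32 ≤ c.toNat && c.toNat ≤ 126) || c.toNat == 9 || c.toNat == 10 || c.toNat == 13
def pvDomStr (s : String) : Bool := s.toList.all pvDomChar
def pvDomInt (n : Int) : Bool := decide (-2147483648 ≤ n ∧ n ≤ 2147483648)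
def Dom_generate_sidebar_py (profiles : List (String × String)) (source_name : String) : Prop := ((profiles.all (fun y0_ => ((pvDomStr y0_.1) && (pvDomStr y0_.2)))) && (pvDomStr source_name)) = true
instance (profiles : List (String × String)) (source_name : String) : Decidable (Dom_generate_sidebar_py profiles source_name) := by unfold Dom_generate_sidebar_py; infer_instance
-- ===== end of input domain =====

-- B replaces A's dict-of-lists grouping (plus per-table sorts) by one flat sort of all
-- (table, column) pairs walked with a groupby; same output, similar cost (objective: alternative).


-- shared HTML text pieces (pure string literals, used by both ports)
def pvHeader : List Char :=
  "<h3>Navigation</h3><ul><li><a href=\"#\" class=\"sidebar-link\" data-target=\"dashboard\">Dashboard</a></li>".toList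
def pvTableLi (table : String) : List Char :=
  "<li><a href=\"#\" class=\"sidebar-link\" data-target=\"summary-".toList ++ table.toList
    ++ "\">".toList ++ table.toList ++ "</a><ul>".toList
def pvColLi (table col : String) : List Char :=
  "<li><a href=\"#\" class=\"sidebar-link\" data-target=\"summary-".toList ++ table.toList
    ++ "-".toList ++ col.toList ++ "\">".toList ++ col.toList ++ "</a></li>".toList

-- ===== PORT A =====
def generate_sidebar_py (profiles : List (String × String)) (source_name : String) : String :=
  -- html = "<h3>Navigation</h3>"; html += '<ul><li>…Dashboard…</li>'
  let html : List Char := "<h3>Navigation</h3>".toList ++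
    "<ul><li><a href=\"#\" class=\"sidebar-link\" data-target=\"dashboard\">Dashboard</a></li>".toList
  -- for key in profiles.keys(): …
  let structure_ : PySem.Dict String (List String) :=
    (PySem.Dict.ofList profiles).keys.foldl (fun st key =>
      let parts := (PySem.Str.split? key ".").getD []   -- sep "." is nonempty, split? never returns none
      if parts.length == 2 then
        let table := parts.getD 0 ""
        let column := parts.getD 1 ""
        let st' := if st.contains table then st else st.insert table []
        st'.insert table (st'.getD table [] ++ [column])
      else st) PySem.Dict.empty
  -- for table, columns in sorted(structure.items()): …
  -- (dict keys are unique, so Python's tuple sort orders the items by the table name alone)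
  let html := (PySem.List.sorted structure_.items (fun p => p.1)).foldl (fun html p =>
      let html := html ++ pvTableLi p.1
      let html := (PySem.List.sorted p.2 (fun c => c)).foldl (fun html col => html ++ pvColLi p.1 col) html
      html ++ "</ul></li>".toList) html
  String.ofList (html ++ "</ul>".toList)

-- ===== PORT B =====
def pvParse (key : String) : Option (String × String) :=
  let parts := (PySem.Str.split? key ".").getD []      -- sep "." is nonempty, split? never returns none
  if parts.length == 2 then some (parts.getD 0 "", parts.getD 1 "") else none

-- itertools.groupby on the table component, collecting each group's columns
def pvGroupBy : List (String × String) → List (String × List String)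
  | [] => []
  | (t, c) :: rest =>
    match pvGroupBy rest with
    | (t', cs) :: gs => if t = t' then (t, c :: cs) :: gs else (t, [c]) :: (t', cs) :: gs
    | [] => [(t, [c])]

def generate_sidebar_py_alt (profiles : List (String × String)) (source_name : String) : String :=
  let pairs := PySem.List.sorted2 ((PySem.Dict.ofList profiles).keys.filterMap pvParse)
    (fun p => p.1) (fun p => p.2)
  let out := pvHeader :: (pvGroupBy pairs).flatMap (fun g =>
      pvTableLi g.1 :: g.2.map (fun c => pvColLi g.1 c) ++ ["</ul></li>".toList]) ++ ["</ul>".toList]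
  String.ofList (PySem.Chars.join [] out)

-- ===== PRECONDITION & SPEC =====
def Spec_generate_sidebar_py (profiles : List (String × String)) (source_name : String) (out : String) : Prop := out = generate_sidebar_py_alt profiles source_name
instance (profiles : List (String × String)) (source_name : String) (out : String) : Decidable (Spec_generate_sidebar_py profiles source_name out) := by unfold Spec_generate_sidebar_py; infer_instance

-- ===== CLAIM (what is proved, stated in full; the proofs are below) =====
def Claim_equal_generate_sidebar_py : Prop := ∀ (profiles : List (String × String)) (source_name : String), Dom_generate_sidebar_py profiles source_name → Spec_generate_sidebar_py profiles source_name (generate_sidebar_py profiles source_name)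

-- ===== LEMMAS AND PROOFS =====

-- proof-only abbreviations
def pvPairs (profiles : List (String × String)) : List (String × String) :=
  (PySem.Dict.ofList profiles).keys.filterMap pvParse
def pvCols (pairs : List (String × String)) (t : String) : List String :=
  (pairs.filter (fun p => p.1 == t)).map (fun p => p.2)
def pvST (pairs : List (String × String)) : List String :=
  PySem.List.sorted (PySem.Set.ofList (pairs.map (fun p => p.1))) (fun t => t)
def pvSection (pairs : List (String × String)) (t : String) : List Char :=
  pvTableLi t ++ (PySem.List.sorted (pvCols pairs t) (fun c => c)).flatMap (pvColLi t)
    ++ "</ul></li>".toList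

theorem pv_dict_insert_insert {κ ν : Type} [BEq κ] [LawfulBEq κ]
    (d : PySem.Dict κ ν) (k : κ) (v w : ν) :
    (d.insert k v).insert k w = d.insert k w := by
  apply PySem.Dict.ext
  by_cases h : d.contains k = true
  · rw [PySem.Dict.items_insert_of_contains _ _ (PySem.Dict.contains_insert_self d k v),
        PySem.Dict.items_insert_of_contains _ _ h, PySem.Dict.items_insert_of_contains _ _ h,
        List.map_map]
    apply List.map_congr_left
    intro p _
    by_cases hp : (p.1 == k) = true <;> simp [hp]
  · have h' : d.contains k = false := by simpa using h
    rw [PySem.Dict.items_insert_of_contains _ _ (PySem.Dict.contains_insert_self d k v),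
        PySem.Dict.items_insert_of_not_contains _ _ h',
        PySem.Dict.items_insert_of_not_contains _ _ h', List.map_append]
    have hmem : ∀ p ∈ d.items, (p.1 == k) = false := by
      intro p hp
      have hk : p.1 ∈ d.keys := by
        have hkeys : d.keys = d.items.map (fun q => q.1) := rfl
        rw [hkeys]; exact List.mem_map_of_mem hp
      by_contra hbad
      have hpk : p.1 = k := by simpa using hbad
      have := (PySem.Dict.contains_iff_mem_keys d p.1).mpr hk
      rw [hpk] at this
      simp [h'] at this
    have hid : d.items.map (fun p => if (p.1 == k) = true then (k, w) else p) = d.items := by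
      refine (List.map_congr_left ?_).trans (List.map_id _)
      intro p hp; simp [hmem p hp]
    simp [hid]


-- A's grouping loop is the modify-fold over the parsed pairs
theorem pvA_fold (profiles : List (String × String)) :
    (PySem.Dict.ofList profiles).keys.foldl (fun st key =>
      let parts := (PySem.Str.split? key ".").getD []
      if parts.length == 2 then
        let table := parts.getD 0 ""
        let column := parts.getD 1 ""
        let st' := if st.contains table then st else st.insert table []
        st'.insert table (st'.getD table [] ++ [column])
      else st) PySem.Dict.empty
    = (pvPairs profiles).foldl (fun d p => d.modify p.1 [] (· ++ [p.2])) PySem.Dict.empty := by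
  rw [pvPairs, List.foldl_filterMap]
  congr 1
  funext st key
  simp only [pvParse]
  by_cases h : ((PySem.Str.split? key ".").getD []).length == 2
  · simp only [h, if_true]
    simp only [PySem.Dict.modify]
    set parts := (PySem.Str.split? key ".").getD [] with hparts
    set t := parts.getD 0 "" with ht
    by_cases hc : st.contains t = true
    · rw [if_pos hc]
    · rw [if_neg hc]
      have hc' : st.contains t = false := by simpa using hc
      rw [PySem.Dict.getD_insert_self, PySem.Dict.getD_of_not_contains st [] hc',
        pv_dict_insert_insert]
  · simp [h]

theorem pvA_sorted_items (pairs : List (String × String)) :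
    PySem.List.sorted (pairs.foldl (fun d p => d.modify p.1 [] (· ++ [p.2]))
        PySem.Dict.empty).items (fun p => p.1)
      = (pvST pairs).map (fun t => (t, pvCols pairs t)) := by
  set st := pairs.foldl (fun d p => d.modify p.1 [] (· ++ [p.2])) PySem.Dict.empty with hst
  have hkeys : st.keys = PySem.Set.ofList (pairs.map (fun p => p.1)) := by
    have := PySem.Dict.keys_foldl_modify_key pairs (fun p => p.1) ([] : List String)
      (fun _ p v => v ++ [p.2]) PySem.Dict.empty
    simpa [hst] using this
  have hnd : st.keys.Nodup := by
    have := PySem.Dict.nodup_keys_foldl_modify_key pairs (fun p => p.1) ([] : List String)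
      (fun _ p v => v ++ [p.2]) PySem.Dict.empty PySem.Dict.nodup_keys_empty
    simpa [hst] using this
  have hgetD : ∀ t, st.getD t [] = pvCols pairs t := by
    intro t
    have := PySem.Dict.getD_foldl_modify_append pairs PySem.Dict.empty t
    simpa [hst, pvCols] using this
  have hitems : st.items = (PySem.Set.ofList (pairs.map (fun p => p.1))).map
      (fun t => (t, pvCols pairs t)) := by
    have h1 : st.keys.map (fun k => (k, st.getD k [])) = st.items := by
      rw [show st.keys = st.items.map (fun p => p.1) from rfl, List.map_map]
      refine (List.map_congr_left ?_).trans (List.map_id _)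
      intro p hp
      have hm : (p.1, p.2) ∈ st.items := by simpa using hp
      have := PySem.Dict.getD_of_mem_items st hm hnd []
      simp only [Function.comp]
      rw [this]
      simp
    rw [← h1, hkeys]
    apply List.map_congr_left
    intro t _
    rw [hgetD t]
  apply PySem.List.sorted_eq_of_perm_of_pairwise_lt
  · rw [hitems]
    exact (PySem.List.sorted_perm _ _ _).map _
  · rw [List.pairwise_map]
    have := PySem.List.sorted_ofList_pairwise_lt (pairs.map (fun p => p.1))
    exact this.imp (fun h => h)

theorem pv_perm_flatMap_filter (l : List (String × String)) (ts : List String)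
    (hnd : ts.Nodup) (hcov : ∀ p ∈ l, p.1 ∈ ts) :
    (ts.flatMap (fun t => l.filter (fun p => p.1 == t))).Perm l := by
  induction ts generalizing l with
  | nil =>
    cases l with
    | nil => simp
    | cons p l' => exact absurd (hcov p (by simp)) (by simp)
  | cons t ts ih =>
    rw [List.flatMap_cons]
    have hsub : ts.flatMap (fun t' => l.filter (fun p => p.1 == t'))
        = ts.flatMap (fun t' => (l.filter (fun p => !(p.1 == t))).filter (fun p => p.1 == t')) := by
      apply List.flatMap_congr
      intro t' ht'
      rw [List.filter_filter]
      apply List.filter_congr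
      intro p _
      by_cases hp : (p.1 == t') = true
      · have : p.1 = t' := by simpa using hp
        have hne : t' ≠ t := fun he => (List.nodup_cons.mp hnd).1 (he ▸ ht')
        simp [this, hne]
      · simp [Bool.eq_false_iff.mpr hp]
    rw [hsub]
    have hperm2 := ih (l.filter (fun p => !(p.1 == t)))
      (List.nodup_cons.mp hnd).2
      (by
        intro p hp
        have hmem := List.mem_filter.mp hp
        have := hcov p hmem.1
        rcases List.mem_cons.mp this with he | hts
        · exfalso; rw [he] at hmem; simp at hmem
        · exact hts)
    exact (hperm2.append_left (l.filter (fun p => p.1 == t))).trans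
      (List.filter_append_perm _ l)

theorem pvB_sorted2 (pairs : List (String × String)) :
    PySem.List.sorted2 pairs (fun p => p.1) (fun p => p.2)
      = PySem.List.sorted pairs (fun p => toLex p) := by
  rw [PySem.List.sorted_eq_foldl_insertBy]
  simp only [PySem.List.sorted2]
  congr 1
  funext acc x
  congr 1
  funext a b
  rcases lt_trichotomy a.1 b.1 with h | h | h
  · simp [Prod.Lex.lt_iff, h, not_lt_of_gt h]
  · simp [Prod.Lex.lt_iff, h]
  · simp [Prod.Lex.lt_iff, not_lt_of_gt h, ne_of_gt h, h]

theorem pvB_sorted (pairs : List (String × String)) :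
    PySem.List.sorted pairs (fun p => toLex p)
      = (pvST pairs).flatMap (fun t =>
          (PySem.List.sorted (pvCols pairs t) (fun c => c)).map (fun c => (t, c))) := by
  apply PySem.List.eq_of_perm_of_pairwise_le_of_injective (fun p => toLex p)
    (fun x y h => by simpa using congrArg ofLex h)
  · -- perm
    refine (PySem.List.sorted_perm _ _ _).trans ?_
    have h1 : (pvST pairs).flatMap (fun t => pairs.filter (fun p => p.1 == t))
        |>.Perm pairs := by
      apply pv_perm_flatMap_filter
      · have := (PySem.List.sorted_ofList_pairwise_lt
          (pairs.map (fun p => p.1))).imp (fun h => ne_of_lt h)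
        exact this
      · intro p hp
        rw [pvST, PySem.List.mem_sorted, PySem.Set.mem_ofList]
        exact List.mem_map_of_mem hp
    refine h1.symm.trans (List.Perm.flatMap_left _ ?_)
    intro t _
    have hmap : (pairs.filter (fun p => p.1 == t)).map (fun p => (t, p.2))
        = pairs.filter (fun p => p.1 == t) := by
      refine (List.map_congr_left ?_).trans (List.map_id _)
      intro p hp
      have : p.1 = t := by simpa using (List.mem_filter.mp hp).2
      simp [← this]
    rw [← hmap]
    have h2 : ((PySem.List.sorted (pvCols pairs t) (fun c => c)).map (fun c => (t, c))).Perm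
        ((pvCols pairs t).map (fun c => (t, c))) := (PySem.List.sorted_perm _ _ _).map _
    refine List.Perm.symm (h2.trans (List.Perm.of_eq ?_))
    rw [pvCols, List.map_map]
    rfl
  · -- pairwise le on sorted
    exact PySem.List.sorted_pairwise _ _
  · -- pairwise le on flatMap
    rw [List.pairwise_flatMap]
    constructor
    · intro t _
      rw [List.pairwise_map]
      refine (PySem.List.sorted_pairwise (pvCols pairs t) (fun c => c)).imp ?_
      intro c1 c2 h
      rw [Prod.Lex.le_iff]
      exact Or.inr ⟨rfl, h⟩
    · refine (PySem.List.sorted_ofList_pairwise_lt _).imp ?_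
      intro t1 t2 hlt x hx y hy
      obtain ⟨c1, _, rfl⟩ := List.mem_map.mp hx
      obtain ⟨c2, _, rfl⟩ := List.mem_map.mp hy
      rw [Prod.Lex.le_iff]
      exact Or.inl hlt

theorem pv_groupBy_head (x : String × String) (rest : List (String × String)) :
    ∃ cs gs, pvGroupBy (x :: rest) = (x.1, cs) :: gs := by
  obtain ⟨t, c⟩ := x
  show ∃ cs gs, pvGroupBy ((t, c) :: rest) = (t, cs) :: gs
  unfold pvGroupBy
  rcases hg : pvGroupBy rest with _ | ⟨⟨t', cs'⟩, gs'⟩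
  · exact ⟨[c], [], rfl⟩
  · by_cases h : t = t'
    · exact ⟨c :: cs', gs', by simp [h]⟩
    · exact ⟨[c], (t', cs') :: gs', by simp [h]⟩

theorem pv_groupBy_block (t : String) (cs : List String) (rest : List (String × String))
    (hcs : cs ≠ []) (hrest : ∀ p ∈ rest, p.1 ≠ t) :
    pvGroupBy (cs.map (fun c => (t, c)) ++ rest) = (t, cs) :: pvGroupBy rest := by
  induction cs with
  | nil => exact absurd rfl hcs
  | cons c cs ih =>
    cases cs with
    | nil =>
      simp only [List.map_cons, List.map_nil, List.nil_append, List.cons_append]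
      cases rest with
      | nil => rfl
      | cons r rest' =>
        obtain ⟨cs0, gs0, hg⟩ := pv_groupBy_head r rest'
        show pvGroupBy ((t, c) :: r :: rest') = (t, [c]) :: pvGroupBy (r :: rest')
        conv_lhs => unfold pvGroupBy
        rw [hg]
        simp [Ne.symm (hrest r (by simp))]
    | cons c' cs' =>
      have ih' := ih (by simp)
      show pvGroupBy ((t, c) :: (List.map (fun c => (t, c)) (c' :: cs') ++ rest))
          = (t, c :: c' :: cs') :: pvGroupBy rest
      conv_lhs => unfold pvGroupBy
      rw [ih']
      simp

theorem pv_groupBy_blocks (pairs : List (String × String)) (ts : List String)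
    (hpw : ts.Pairwise (· < ·)) (hne : ∀ t ∈ ts, pvCols pairs t ≠ []) :
    pvGroupBy (ts.flatMap (fun t =>
        (PySem.List.sorted (pvCols pairs t) (fun c => c)).map (fun c => (t, c))))
      = ts.map (fun t => (t, PySem.List.sorted (pvCols pairs t) (fun c => c))) := by
  induction ts with
  | nil => rfl
  | cons t ts ih =>
    rw [List.flatMap_cons, pv_groupBy_block]
    · rw [ih (List.pairwise_cons.mp hpw).2 (fun t' ht' => hne t' (by simp [ht']))]
      rfl
    · rw [Ne, PySem.List.sorted_eq_nil_iff]
      exact hne t (by simp)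
    · intro p hp
      obtain ⟨t', ht', hp'⟩ := List.mem_flatMap.mp hp
      obtain ⟨c, _, rfl⟩ := List.mem_map.mp hp'
      exact ne_of_gt (List.rel_of_pairwise_cons hpw ht')

theorem pvB_groupBy (pairs : List (String × String)) :
    pvGroupBy ((pvST pairs).flatMap (fun t =>
        (PySem.List.sorted (pvCols pairs t) (fun c => c)).map (fun c => (t, c))))
      = (pvST pairs).map (fun t => (t, PySem.List.sorted (pvCols pairs t) (fun c => c))) := by
  apply pv_groupBy_blocks
  · exact PySem.List.sorted_ofList_pairwise_lt _
  · intro t ht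
    rw [pvST, PySem.List.mem_sorted, PySem.Set.mem_ofList] at ht
    obtain ⟨p, hp, hpt⟩ := List.mem_map.mp ht
    rw [pvCols, Ne, List.map_eq_nil_iff, List.filter_eq_nil_iff]
    intro h
    exact h p hp (by simp [hpt])

theorem pv_join_nil (l : List (List Char)) : PySem.Chars.join [] l = l.flatten := by
  induction l with
  | nil => simp [PySem.Chars.join_nil]
  | cons p l ih =>
    cases l with
    | nil => simp [PySem.Chars.join_singleton]
    | cons q r =>
      rw [PySem.Chars.join_cons_cons, List.flatten_cons, ← ih]
      simp

theorem pv_main (profiles : List (String × String)) (source_name : String) :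
    generate_sidebar_py profiles source_name = generate_sidebar_py_alt profiles source_name := by
  simp only [generate_sidebar_py, generate_sidebar_py_alt]
  rw [pvA_fold, pvA_sorted_items]
  rw [show (PySem.Dict.ofList profiles).keys.filterMap pvParse = pvPairs profiles from rfl]
  rw [pvB_sorted2, pvB_sorted, pvB_groupBy, pv_join_nil]
  congr 1
  simp only [List.foldl_map]
  have hbody : (fun (html : List Char) (t : String) =>
      List.foldl (fun html col => html ++ pvColLi t col) (html ++ pvTableLi t)
          (PySem.List.sorted (pvCols (pvPairs profiles) t) fun c => c) ++ "</ul></li>".toList)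
      = fun (html : List Char) (t : String) => html ++ (pvTableLi t
          ++ (PySem.List.sorted (pvCols (pvPairs profiles) t) fun c => c).flatMap (pvColLi t)
          ++ "</ul></li>".toList) := by
    funext html t
    rw [PySem.List.foldl_append_eq_flatMap]
    simp [List.append_assoc]
  rw [hbody, PySem.List.foldl_append_eq_flatMap]
  have hH : pvHeader = "<h3>Navigation</h3>".toList ++
      "<ul><li><a href=\"#\" class=\"sidebar-link\" data-target=\"dashboard\">Dashboard</a></li>".toList := by
    rfl
  rw [hH]
  simp only [List.flatMap_map, List.flatten_eq_flatMap, List.flatMap_assoc, List.flatMap_cons,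
    List.flatMap_append, List.flatMap_nil, id_eq, List.append_nil, List.append_assoc]

-- ===== VERDICT (by name: the statement is the Claim_ definition above) =====
theorem generate_sidebar_py_spec : Claim_equal_generate_sidebar_py := by
  intro profiles source_name _
  exact pv_main profiles source_name
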